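-- pv_equiv track=rewrite | github.com/jstchw/drug_search | backend/app/utils.py | count_entries_by_year
-- ===== SOURCE A (Python) =====
-- def count_entries_by_year(data):
--     """
--     Count the number of entries in the given data by publication date.
--
--     *IMPORTANT*: If the property is 'age', the algorithm counts all age groups that the entry falls into.
--     For example: entry with age: [60, 120] will be put both in 'adult' and 'elderly' groups.
--     This is done to avoid losing data when the age is a range since the data is super sparse.
--
--     Args:
--         data (list): A list of entries to be counted.
--
--     Returns:
--         dict: A dictionary containing the counts of entries by publication date. Sorted by year.
--     """
--     counts = {}
--
--     for entry in data:
--         pub_date = entry.get("pub_date")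
--         if pub_date:
--             year = pub_date.split("-")[0]
--             counts[year] = counts.get(year, 0) + 1
--
--     return dict(sorted(counts.items(), key=lambda x: x[0]))
-- ===== SOURCE B (Python) =====
-- def count_entries_by_year(data):
--     # Sort the extracted years first, then tally runs of equal years in one
--     # grouped pass; the result is naturally in ascending year order.
--     years = sorted(e["pub_date"].split("-")[0] for e in data if e.get("pub_date"))
--     counts = {}
--     rest = years
--     while rest:
--         y = rest[0]
--         k = 1
--         while k < len(rest) and rest[k] == y:
--             k += 1
--         counts[y] = k
--         rest = rest[k:]
--     return counts
-- ===== Notes on version B (the rewrite author's own statement) =====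
-- stated objective: alternative
-- what changed: Replaces the hash-tally-then-sort-the-items approach with sort-the-year-list-first and a single run-length grouping pass over the sorted list, which yields the counts already in ascending year order.
import Mathlib
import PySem

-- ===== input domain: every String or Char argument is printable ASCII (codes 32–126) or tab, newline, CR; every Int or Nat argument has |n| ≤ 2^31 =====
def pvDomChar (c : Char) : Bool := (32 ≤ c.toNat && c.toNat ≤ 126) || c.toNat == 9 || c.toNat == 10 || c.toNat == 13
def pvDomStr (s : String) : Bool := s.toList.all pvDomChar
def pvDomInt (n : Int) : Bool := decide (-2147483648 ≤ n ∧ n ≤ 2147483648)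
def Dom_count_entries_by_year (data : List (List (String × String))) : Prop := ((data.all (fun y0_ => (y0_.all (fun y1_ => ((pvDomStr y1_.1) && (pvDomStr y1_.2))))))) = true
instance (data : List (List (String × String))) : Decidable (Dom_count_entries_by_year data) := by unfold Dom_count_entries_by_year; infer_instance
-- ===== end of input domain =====

-- B restructures A: instead of tallying into a dict and sorting its items, B sorts the
-- extracted year list first and counts runs of equal years in one grouped pass (alternative
-- decomposition, same results).

-- ===== PORT A =====
-- pub_date.split("-")[0]: split? with a non-empty separator is always `some` of a
-- non-empty list, so the two defaults are never hit (exact on every input).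
def pvYearOf (pd : String) : String := ((PySem.Str.split? pd "-").getD []).headD ""

def count_entries_by_year (data : List (List (String × String))) : List (String × Int) :=
  let counts := data.foldl (fun (d : PySem.Dict String Int) entry =>
    match (PySem.Dict.mk entry).get? "pub_date" with
    | none => d
    | some pd =>
      if pd = "" then d
      else
        let year := pvYearOf pd
        d.insert year (d.getD year 0 + 1)) PySem.Dict.empty
  PySem.List.sorted counts.items (fun x => x.1)

-- ===== PORT B =====
-- the generator expression feeding sorted(...)
def pvYears (data : List (List (String × String))) : List String :=
  data.filterMap (fun entry =>
    match (PySem.Dict.mk entry).get? "pub_date" with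
    | none => none
    | some pd => if pd = "" then none else some (pvYearOf pd))

-- the while-loop over `rest`: scan the run of the leading year, record its length, move on
def pvGroupRuns : List String → List (String × Int)
  | [] => []
  | y :: t =>
    (y, (1 + (t.takeWhile (fun z => z == y)).length : Int)) ::
      pvGroupRuns (t.dropWhile (fun z => z == y))
termination_by l => l.length
decreasing_by
  simp only [List.length_cons]
  exact Nat.lt_succ_of_le (List.Sublist.length_le (List.dropWhile_sublist _))

def count_entries_by_year_alt (data : List (List (String × String))) : List (String × Int) :=
  pvGroupRuns (PySem.List.sorted (pvYears data) (fun y => y))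

-- ===== PRECONDITION & SPEC =====
def Spec_count_entries_by_year (data : List (List (String × String))) (out : List (String × Int)) : Prop := out = count_entries_by_year_alt data
instance (data : List (List (String × String))) (out : List (String × Int)) : Decidable (Spec_count_entries_by_year data out) := by unfold Spec_count_entries_by_year; infer_instance

-- ===== CLAIM (what is proved, stated in full; the proofs are below) =====
def Claim_equal_count_entries_by_year : Prop := ∀ (data : List (List (String × String))), Dom_count_entries_by_year data → Spec_count_entries_by_year data (count_entries_by_year data)

-- ===== LEMMAS AND PROOFS =====

-- A's dict-tallying fold over `data` is the counter of the extracted year list.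
theorem pv_foldA_eq_counter (data : List (List (String × String))) :
    data.foldl (fun (d : PySem.Dict String Int) entry =>
      match (PySem.Dict.mk entry).get? "pub_date" with
      | none => d
      | some pd =>
        if pd = "" then d
        else
          let year := pvYearOf pd
          d.insert year (d.getD year 0 + 1)) PySem.Dict.empty
    = PySem.Dict.counter (pvYears data) := by
  rw [← PySem.Dict.foldl_insert_getD_add_one_eq_counter]
  generalize PySem.Dict.empty = d0
  induction data generalizing d0 with
  | nil => rfl
  | cons e rest ih =>
    simp only [List.foldl_cons, pvYears, List.filterMap_cons]
    cases h : (PySem.Dict.mk e).get? "pub_date" with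
    | none => exact ih d0
    | some pd =>
      by_cases hpd : pd = "" <;> simp only [hpd, reduceIte, List.foldl_cons] <;> exact ih _

-- every key produced by pvGroupRuns is an element of the input list
theorem pv_groupRuns_keys_mem (l : List String) (a : String × Int)
    (h : a ∈ pvGroupRuns l) : a.1 ∈ l := by
  induction l using pvGroupRuns.induct with
  | case1 => simp [pvGroupRuns] at h
  | case2 y t ih =>
    rw [pvGroupRuns] at h
    rcases List.mem_cons.mp h with h | h
    · simp [h]
    · exact List.mem_cons_of_mem _ ((List.dropWhile_sublist _).mem (ih h))

-- folding Set.add from a seed `y :: s` over elements ≠ y just pushes y outside the fold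
theorem pv_foldl_add_cons {y : String} :
    ∀ (rest : List String) (s : PySem.Set String), (∀ z ∈ rest, z ≠ y) →
      List.foldl PySem.Set.add (y :: s) rest = y :: List.foldl PySem.Set.add s rest := by
  intro rest
  induction rest with
  | nil => intro s _; rfl
  | cons z rs ih =>
    intro s hz
    have hzy : z ≠ y := hz z (List.mem_cons_self)
    have h2 : ∀ w ∈ rs, w ≠ y := fun w hw => hz w (List.mem_cons_of_mem _ hw)
    simp only [List.foldl_cons]
    have hadd : PySem.Set.add (y :: s) z = y :: PySem.Set.add s z := by
      by_cases hc : z ∈ s <;>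
        simp [PySem.Set.add, PySem.Set.contains, hzy, hc]
    rw [hadd]
    exact ih _ h2

-- Set.ofList of a sorted run: leading year, its duplicates, then strictly larger elements
theorem pv_ofList_run (y : String) (run rest : List String)
    (hrun : ∀ z ∈ run, z = y) (hrest : ∀ z ∈ rest, z ≠ y) :
    PySem.Set.ofList (y :: (run ++ rest)) = y :: PySem.Set.ofList rest := by
  rw [PySem.Set.ofList_eq_foldl, PySem.Set.ofList_eq_foldl]
  simp only [List.foldl_cons, List.foldl_append]
  have h0 : List.foldl PySem.Set.add (PySem.Set.add [] y) run = [y] := by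
    have : PySem.Set.add ([] : PySem.Set String) y = [y] := rfl
    rw [this]; clear this
    induction run with
    | nil => rfl
    | cons z rs ih =>
      have hzy := hrun z List.mem_cons_self
      simp only [List.foldl_cons, hzy, PySem.Set.add, PySem.Set.contains]
      simp only [List.contains_cons, beq_self_eq_true, Bool.true_or, if_true]
      exact ih (fun w hw => hrun w (List.mem_cons_of_mem _ hw))
  rw [h0]
  exact pv_foldl_add_cons rest [] hrest

-- On a non-decreasing list, the grouped pass returns each distinct year (in first-occurrence
-- order) paired with its multiplicity.
theorem pv_groupRuns_eq (l : List String) (h : l.Pairwise (· ≤ ·)) :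
    pvGroupRuns l = (PySem.Set.ofList l).map (fun k => (k, (l.count k : Int))) := by
  induction l using pvGroupRuns.induct with
  | case1 => simp [pvGroupRuns]
  | case2 y t ih =>
    set run := t.takeWhile (fun z => z == y) with hrundef
    set rest := t.dropWhile (fun z => z == y) with hrestdef
    have hsplit : t = run ++ rest := (List.takeWhile_append_dropWhile).symm
    have hrun : ∀ z ∈ run, z = y := by
      intro z hz
      have := List.mem_takeWhile_imp hz
      simpa using this
    have hyt : ∀ z ∈ t, y ≤ z := by
      intro z hz
      exact (List.pairwise_cons.mp h).1 z hz
    have hrest : ∀ z ∈ rest, z ≠ y := by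
      intro z hz heq
      -- rest is non-empty with head ≠ y; every element of rest is ≥ head > y … simpler:
      -- directly: if z = y it would satisfy the takeWhile predicate; use dropWhile structure
      cases hr : rest with
      | nil => rw [hr] at hz; simp at hz
      | cons r rs =>
        have hrne : (r == y) = false := by
          have := List.head_dropWhile_not (p := fun z => z == y) (l := t)
          rw [← hrestdef, hr] at this
          simpa using this (by simp)
        -- pairwise on rest: r ≤ z for z in rs
        have hprest : rest.Pairwise (· ≤ ·) := by
          have hpt : t.Pairwise (· ≤ ·) := (List.pairwise_cons.mp h).2
          exact hpt.sublist (List.dropWhile_sublist _)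
        have hyr : y ≤ r := hyt r ((List.dropWhile_sublist _).mem (by rw [← hrestdef, hr]; simp))
        have hry : r ≠ y := by simpa using hrne
        have hrltz : r ≤ z := by
          rw [hr] at hz
          rcases List.mem_cons.mp hz with rfl | hz'
          · exact le_refl _
          · exact ((List.pairwise_cons.mp (hr ▸ hprest)).1 z hz')
        rw [heq] at hrltz
        exact hry (le_antisymm hrltz hyr)
    have hprest : rest.Pairwise (· ≤ ·) :=
      ((List.pairwise_cons.mp h).2).sublist (List.dropWhile_sublist _)
    rw [pvGroupRuns, ih hprest]
    have hof : PySem.Set.ofList (y :: t) = y :: PySem.Set.ofList rest := by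
      rw [hsplit]; exact pv_ofList_run y run rest hrun hrest
    rw [hof, List.map_cons]
    congr 1
    · -- count of y in y :: t is 1 + run.length
      have hcrun : run.count y = run.length :=
        List.count_eq_length.mpr (fun z hz => ((hrun z hz).symm ▸ rfl))
      have hcrest : rest.count y = 0 :=
        List.count_eq_zero.mpr (fun hmem => (hrest y hmem) rfl)
      have hct : (y :: t).count y = 1 + run.length := by
        rw [List.count_cons_self, hsplit, List.count_append, hcrun, hcrest]
        omega
      rw [hct, ← hrundef]
      norm_cast
    · -- for keys from rest, counting in rest and in y :: t agree
      apply List.map_congr_left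
      intro k hk
      have hkrest : k ∈ rest := (PySem.Set.mem_ofList rest k).mp hk
      have hky : k ≠ y := hrest k hkrest
      have hcrun : run.count k = 0 :=
        List.count_eq_zero.mpr (fun hmem => hky (hrun k hmem))
      have hct : (y :: t).count k = rest.count k := by
        rw [List.count_cons_of_ne (fun h => hky h.symm), hsplit, List.count_append, hcrun]
        omega
      rw [hct]

-- on a non-decreasing list the grouped keys are strictly increasing
theorem pv_groupRuns_pairwise (l : List String) (h : l.Pairwise (· ≤ ·)) :
    (pvGroupRuns l).Pairwise (fun a b => a.1 < b.1) := by
  induction l using pvGroupRuns.induct with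
  | case1 => simp [pvGroupRuns]
  | case2 y t ih =>
    set rest := t.dropWhile (fun z => z == y) with hrestdef
    have hprest : rest.Pairwise (· ≤ ·) :=
      ((List.pairwise_cons.mp h).2).sublist (List.dropWhile_sublist _)
    rw [pvGroupRuns]
    refine List.pairwise_cons.mpr ⟨?_, ih hprest⟩
    intro b hb
    have hbmem : b.1 ∈ rest := pv_groupRuns_keys_mem rest b hb
    -- every element of rest is > y
    cases hr : rest with
    | nil => rw [hr] at hbmem; simp at hbmem
    | cons r rs =>
      have hrne : (r == y) = false := by
        have := List.head_dropWhile_not (p := fun z => z == y) (l := t)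
        rw [← hrestdef, hr] at this
        simpa using this (by simp)
      have hyr : y ≤ r :=
        (List.pairwise_cons.mp h).1 r ((List.dropWhile_sublist _).mem (by rw [← hrestdef, hr]; simp))
      have hylt : y < r := lt_of_le_of_ne hyr (by simpa using (Ne.symm (by simpa using hrne)))
      rcases List.mem_cons.mp (hr ▸ hbmem) with hb1 | hb1
      · rw [hb1]; exact hylt
      · exact lt_of_lt_of_le hylt ((List.pairwise_cons.mp (hr ▸ hprest)).1 b.1 hb1)

-- ===== VERDICT (by name: the statement is the Claim_ definition above) =====
theorem count_entries_by_year_spec : Claim_equal_count_entries_by_year := by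
  intro data _
  show count_entries_by_year data = count_entries_by_year_alt data
  unfold count_entries_by_year count_entries_by_year_alt
  rw [pv_foldA_eq_counter]
  show PySem.List.sorted (PySem.Dict.counter (pvYears data)).items (fun x => x.1)
      = pvGroupRuns (PySem.List.sorted (pvYears data) (fun y => y))
  rw [PySem.Dict.items_counter]
  set ys := pvYears data with hys
  set sl := PySem.List.sorted ys (fun y => y) with hsl
  have hslp : sl.Pairwise (· ≤ ·) := PySem.List.sorted_pairwise ys (fun y => y)
  have hperm : sl.Perm ys := PySem.List.sorted_perm ys (fun y => y) false
  apply PySem.List.sorted_eq_of_perm_of_pairwise_lt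
  · -- pvGroupRuns sl is a permutation of the counter items
    rw [pv_groupRuns_eq sl hslp]
    have hmemeq : ∀ a, a ∈ PySem.Set.ofList sl ↔ a ∈ PySem.Set.ofList ys := by
      intro a
      rw [PySem.Set.mem_ofList, PySem.Set.mem_ofList]
      exact ⟨fun h => hperm.mem_iff.mp h, fun h => hperm.mem_iff.mpr h⟩
    have hsetperm : (PySem.Set.ofList sl).Perm (PySem.Set.ofList ys) :=
      (List.perm_ext_iff_of_nodup (PySem.Set.nodup_ofList sl) (PySem.Set.nodup_ofList ys)).mpr hmemeq
    have hcnt : ∀ k : String, sl.count k = ys.count k := fun k => hperm.count_eq k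
    have hmapeq : (PySem.Set.ofList sl).map (fun k => (k, (sl.count k : Int)))
        = (PySem.Set.ofList sl).map (fun k => (k, (ys.count k : Int))) :=
      List.map_congr_left (fun k _ => by rw [hcnt k])
    rw [hmapeq]
    exact hsetperm.map _
  · exact pv_groupRuns_pairwise sl hslp
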